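-- pv_equiv track=rewrite | github.com/stephan192/hochwasserportal | custom_components/hochwasserportal/api.py | fix_bb_encoding
-- ===== SOURCE A (Python) =====
-- def fix_bb_encoding(input):
--     """Fix utf-8 encoding for BB"""
--     replace = False
--     cnt = 0
--     output = ""
--     for c in input:
--         num = ord(c)
--         # Find '\'
--         if num == 92:
--             replace = True
--             cnt = 0
--             continue
--         if replace:
--             if cnt == 0:
--                 # Find '\u'
--                 if num == 117:
--                     cnt += 1
--                 else:
--                     output = output + chr(92)
--                     output = output + chr(num)
--                     replace = False
--                     continue
--             else:
--                 if 47 < num < 58: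
--                     num = num - 48
--                 elif 64 < num < 71:
--                     num = num - 55
--                 if cnt == 1:
--                     new_num = num * 4096
--                     cnt += 1
--                 elif cnt == 2:
--                     new_num = new_num + (num * 256)
--                     cnt += 1
--                 elif cnt == 3:
--                     new_num = new_num + (num * 16)
--                     cnt += 1
--                 elif cnt == 4:
--                     new_num = new_num + num
--                     output = output + chr(new_num)
--                     replace = False
--         else:
--             output = output + chr(num)
--     return output
-- ===== SOURCE B (Python) =====
-- def fix_bb_encoding(input):
--     """Fix utf-8 encoding for BB"""
--     parts = input.split("\\")
--     pieces = [parts[0]]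
--     for seg in parts[1:]:
--         if not seg:
--             continue
--         if seg[0] == "u":
--             if len(seg) >= 5:
--                 val = 0
--                 for ch in seg[1:5]:
--                     n = ord(ch)
--                     if 47 < n < 58:
--                         n -= 48
--                     elif 64 < n < 71:
--                         n -= 55
--                     val = val * 16 + n
--                 pieces.append(chr(val) + seg[5:])
--             # an escape cut short (end of string or next backslash) produces nothing
--         else:
--             pieces.append("\\" + seg)
--     return "".join(pieces)
-- ===== Notes on version B (the rewrite author's own statement) =====
-- stated objective: simpler
-- what changed: A's five-variable per-character state machine (replace/cnt/new_num flags threaded through one loop of repeated string concatenation) is replaced by split-on-backslash plus a straight-line per-segment decode joined at the end.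
import Mathlib
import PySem

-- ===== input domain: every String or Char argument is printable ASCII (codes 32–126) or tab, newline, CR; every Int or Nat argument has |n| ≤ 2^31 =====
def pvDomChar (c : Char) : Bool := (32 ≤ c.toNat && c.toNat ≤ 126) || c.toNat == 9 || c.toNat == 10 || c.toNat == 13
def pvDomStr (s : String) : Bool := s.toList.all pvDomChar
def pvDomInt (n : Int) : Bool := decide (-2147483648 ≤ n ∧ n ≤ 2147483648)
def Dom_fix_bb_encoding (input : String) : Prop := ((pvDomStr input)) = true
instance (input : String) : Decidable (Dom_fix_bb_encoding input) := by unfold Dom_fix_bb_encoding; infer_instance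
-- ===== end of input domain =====

-- B replaces A's five-variable character state machine by split-on-backslash plus a
-- per-segment decode (objective: simpler decomposition; equivalence on return values).

-- ===== PORT A =====
-- A's loop state: (replace, cnt, new_num, output); chr(n) is ported as Char.ofNat n,
-- exact for every non-surrogate code point < 0x110000 (guaranteed by Pre_ below).
def fixLoop (st : Bool × Nat × Nat × List Char) (c : Char) : Bool × Nat × Nat × List Char :=
  let replace := st.1; let cnt := st.2.1; let newNum := st.2.2.1; let output := st.2.2.2
  let num := c.toNat
  if num = 92 then (true, 0, newNum, output)
  else if replace then
    if cnt = 0 then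
      if num = 117 then (true, cnt + 1, newNum, output)
      else (false, cnt, newNum, output ++ [Char.ofNat 92, Char.ofNat num])
    else
      let num2 := if 47 < num ∧ num < 58 then num - 48
        else if 64 < num ∧ num < 71 then num - 55 else num
      if cnt = 1 then (true, cnt + 1, num2 * 4096, output)
      else if cnt = 2 then (true, cnt + 1, newNum + num2 * 256, output)
      else if cnt = 3 then (true, cnt + 1, newNum + num2 * 16, output)
      else if cnt = 4 then (false, cnt, newNum + num2, output ++ [Char.ofNat (newNum + num2)])
      else (true, cnt, newNum, output)
  else (replace, cnt, newNum, output ++ [Char.ofNat num])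

def fix_bb_encoding (input : String) : String :=
  String.ofList (input.toList.foldl fixLoop (false, 0, 0, [])).2.2.2

-- ===== PORT B =====
def altDigit (n : Nat) : Nat :=
  if 47 < n ∧ n < 58 then n - 48 else if 64 < n ∧ n < 71 then n - 55 else n

def altVal (ds : List Char) : Nat := ds.foldl (fun v c => v * 16 + altDigit c.toNat) 0

def altStep (pieces : List (List Char)) (seg : List Char) : List (List Char) :=
  match seg with
  | [] => pieces
  | c :: rest =>
      if c = 'u' then
        if 4 ≤ rest.length then pieces ++ [Char.ofNat (altVal (rest.take 4)) :: rest.drop 4]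
        else pieces
      else pieces ++ [Char.ofNat 92 :: c :: rest]

-- str.split('\\') is PySem.Chars.splitOn; it never returns [], so parts[0] is headD [].
def fix_bb_encoding_alt (input : String) : String :=
  let parts := PySem.Chars.splitOn input.toList ['\\']
  String.ofList (PySem.Chars.join [] ((parts.drop 1).foldl altStep [parts.headD []]))

-- ===== PRECONDITION & SPEC =====
-- Pre_'s own copy of the per-digit decoding (so Pre_ does not depend on the ports' helpers).
def preDigit (n : Nat) : Nat :=
  if 47 < n ∧ n < 58 then n - 48 else if 64 < n ∧ n < 71 then n - 55 else n

def preVal (ds : List Char) : Nat := ds.foldl (fun v c => v * 16 + preDigit c.toNat) 0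

def preSegOK (seg : List Char) : Bool :=
  match seg with
  | [] => true
  | c :: rest =>
      if c = 'u' ∧ 4 ≤ rest.length then
        preVal (rest.take 4) < 55296 || 57343 < preVal (rest.take 4)
      else true

-- Pre_ excludes inputs on which A RETURNS a value that is not a valid Unicode string (a str
-- containing a lone surrogate): each complete escape (a backslash-free segment after a
-- backslash that starts with the escape marker and has at least 4 more chars) must not decode
-- into the surrogate range 0xD800-0xDFFF; such a value is unrepresentable as a Lean String.
-- Both Pythons return the identical lone-surrogate str there; the proof itself does not need
-- Pre_, it is only what makes the ports' Char.ofNat faithful to Python's chr.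
def Pre_fix_bb_encoding (input : String) : Prop :=
  ∀ seg ∈ (PySem.Chars.splitOn input.toList ['\\']).drop 1, preSegOK seg = true

instance (input : String) : Decidable (Pre_fix_bb_encoding input) := by
  unfold Pre_fix_bb_encoding; infer_instance

def pvWitness_fix_bb_encoding : String := "a\\u0041-\\n"

def Spec_fix_bb_encoding (input : String) (out : String) : Prop := out = fix_bb_encoding_alt input
instance (input : String) (out : String) : Decidable (Spec_fix_bb_encoding input out) := by unfold Spec_fix_bb_encoding; infer_instance

-- ===== CLAIM (what is proved, stated in full; the proofs are below) =====
def Claim_equal_fix_bb_encoding : Prop := ∀ (input : String), Dom_fix_bb_encoding input → Pre_fix_bb_encoding input → Spec_fix_bb_encoding input (fix_bb_encoding input)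

-- ===== LEMMAS AND PROOFS =====

-- A simple structural model of splitting on a single character (proof-side only).
def mySplit : List Char → List (List Char)
  | [] => [[]]
  | c :: cs => if c = '\\' then [] :: mySplit cs else (mySplit cs).modifyHead (c :: ·)

-- What B contributes for one segment after a backslash (proof-side restatement of altStep).
def segOut (seg : List Char) : List Char :=
  match seg with
  | [] => []
  | c :: rest =>
      if c = 'u' then
        if 4 ≤ rest.length then Char.ofNat (altVal (rest.take 4)) :: rest.drop 4 else []
      else Char.ofNat 92 :: c :: rest

theorem mySplit_ne_nil (l : List Char) : mySplit l ≠ [] := by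
  induction l with
  | nil => simp [mySplit]
  | cons c cs ih =>
      simp only [mySplit]; split
      · simp
      · cases h : mySplit cs with
        | nil => exact absurd h ih
        | cons a t => simp

theorem mySplit_cons_ex (c : Char) (l : List Char) (hc : ¬ c = '\\') :
    ∃ h1 t1, mySplit l = h1 :: t1 ∧ mySplit (c :: l) = (c :: h1) :: t1 := by
  cases hs : mySplit l with
  | nil => exact absurd hs (mySplit_ne_nil l)
  | cons h1 t1 => exact ⟨h1, t1, rfl, by simp [mySplit, hc, hs]⟩

theorem ne_bs {c : Char} (h : ¬ c = '\\') : ¬ c.toNat = 92 := by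
  intro hn; exact h (by rw [← Char.ofNat_toNat c, hn])
theorem ne_u {c : Char} (h : ¬ c = 'u') : ¬ c.toNat = 117 := by
  intro hn; exact h (by rw [← Char.ofNat_toNat c, hn])

theorem machine_main : ∀ (n : Nat) (cs : List Char), cs.length ≤ n →
    (∀ cnt nn out, (cs.foldl fixLoop (false, cnt, nn, out)).2.2.2
        = out ++ (mySplit cs).headD [] ++ (((mySplit cs).tail).map segOut).flatten)
    ∧ (∀ nn out, (cs.foldl fixLoop (true, 0, nn, out)).2.2.2
        = out ++ ((mySplit cs).map segOut).flatten) := by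
  intro n
  induction n with
  | zero =>
      intro cs h
      have : cs = [] := List.eq_nil_of_length_eq_zero (by omega)
      subst this
      exact ⟨fun _ _ _ => by simp [mySplit], fun _ _ => by simp [mySplit, segOut]⟩
  | succ n ih =>
      intro cs hlen
      constructor
      · intro cnt nn out
        cases cs with
        | nil => simp [mySplit]
        | cons c rest =>
            simp only [List.length_cons] at hlen
            simp only [List.foldl_cons]
            by_cases hc : c = '\\'
            · subst hc
              have hstep : fixLoop (false, cnt, nn, out) '\\' = (true, 0, nn, out) := by
                simp [fixLoop]
              rw [hstep, (ih rest (by omega)).2 nn out]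
              simp [mySplit]
            · have hstep : fixLoop (false, cnt, nn, out) c
                  = (false, cnt, nn, out ++ [Char.ofNat c.toNat]) := by
                simp [fixLoop, ne_bs hc]
              rw [hstep, (ih rest (by omega)).1 cnt nn _]
              obtain ⟨h1, t1, hs, hsc⟩ := mySplit_cons_ex c rest hc
              simp [hs, hsc, Char.ofNat_toNat]
      · intro nn out
        cases cs with
        | nil => simp [mySplit, segOut]
        | cons c rest =>
            simp only [List.length_cons] at hlen
            simp only [List.foldl_cons]
            by_cases hc : c = '\\'
            · subst hc
              have hstep : fixLoop (true, 0, nn, out) '\\' = (true, 0, nn, out) := by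
                simp [fixLoop]
              rw [hstep, (ih rest (by omega)).2 nn out]
              simp [mySplit, segOut]
            · by_cases hu : c = 'u'
              case neg =>
                have hstep : fixLoop (true, 0, nn, out) c
                    = (false, 0, nn, out ++ [Char.ofNat 92, Char.ofNat c.toNat]) := by
                  simp [fixLoop, ne_bs hc, ne_u hu]
                rw [hstep, (ih rest (by omega)).1 0 nn _]
                obtain ⟨h1, t1, hs, hsc⟩ := mySplit_cons_ex c rest hc
                simp [hs, hsc, segOut, hu, Char.ofNat_toNat]
              case pos =>
                subst hu
                have hstep : fixLoop (true, 0, nn, out) 'u' = (true, 1, nn, out) := by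
                  simp [fixLoop]
                rw [hstep]
                obtain ⟨h1, t1, hs, hsc⟩ := mySplit_cons_ex 'u' rest (by decide)
                rw [hsc]
                -- digit phase: peel up to four characters of rest
                cases rest with
                | nil =>
                    simp only [mySplit] at hs
                    injection hs with hh ht
                    subst hh; subst ht
                    simp [segOut]
                | cons d1 r1 =>
                    simp only [List.length_cons] at hlen
                    simp only [List.foldl_cons]
                    by_cases b1 : d1 = '\\'
                    · subst b1
                      have hst : fixLoop (true, 1, nn, out) '\\' = (true, 0, nn, out) := by
                        simp [fixLoop]
                      rw [hst, (ih r1 (by omega)).2 nn out]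
                      simp only [mySplit] at hs
                      injection hs with hh ht
                      subst hh; subst ht
                      simp [segOut]
                    · have hst : fixLoop (true, 1, nn, out) d1
                          = (true, 2, altDigit d1.toNat * 4096, out) := by
                        simp [fixLoop, altDigit, ne_bs b1]
                      rw [hst]
                      obtain ⟨h2, t2, hs2, hsc2⟩ := mySplit_cons_ex d1 r1 b1
                      rw [hsc2] at hs
                      injection hs with hh ht
                      subst hh; subst ht
                      cases r1 with
                      | nil =>
                          simp only [mySplit] at hs2
                          injection hs2 with hh2 ht2
                          subst hh2; subst ht2
                          simp [segOut]
                      | cons d2 r2 =>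
                          simp only [List.length_cons] at hlen
                          simp only [List.foldl_cons]
                          by_cases b2 : d2 = '\\'
                          · subst b2
                            have hst2 : fixLoop (true, 2, altDigit d1.toNat * 4096, out) '\\'
                                = (true, 0, altDigit d1.toNat * 4096, out) := by
                              simp [fixLoop]
                            rw [hst2, (ih r2 (by omega)).2 _ out]
                            simp only [mySplit] at hs2
                            injection hs2 with hh2 ht2
                            subst hh2; subst ht2
                            simp [segOut]
                          · have hst2 : fixLoop (true, 2, altDigit d1.toNat * 4096, out) d2
                                = (true, 3, altDigit d1.toNat * 4096 + altDigit d2.toNat * 256, out) := by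
                              simp [fixLoop, altDigit, ne_bs b2]
                            rw [hst2]
                            obtain ⟨h3, t3, hs3, hsc3⟩ := mySplit_cons_ex d2 r2 b2
                            rw [hsc3] at hs2
                            injection hs2 with hh3 ht3
                            subst hh3; subst ht3
                            cases r2 with
                            | nil =>
                                simp only [mySplit] at hs3
                                injection hs3 with hh ht
                                subst hh; subst ht
                                simp [segOut]
                            | cons d3 r3 =>
                                simp only [List.length_cons] at hlen
                                simp only [List.foldl_cons]
                                by_cases b3 : d3 = '\\'
                                · subst b3
                                  have hst3 : fixLoop (true, 3, altDigit d1.toNat * 4096 + altDigit d2.toNat * 256, out) '\\'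
                                      = (true, 0, altDigit d1.toNat * 4096 + altDigit d2.toNat * 256, out) := by
                                    simp [fixLoop]
                                  rw [hst3, (ih r3 (by omega)).2 _ out]
                                  simp only [mySplit] at hs3
                                  injection hs3 with hh ht
                                  subst hh; subst ht
                                  simp [segOut]
                                · have hst3 : fixLoop (true, 3, altDigit d1.toNat * 4096 + altDigit d2.toNat * 256, out) d3
                                      = (true, 4, altDigit d1.toNat * 4096 + altDigit d2.toNat * 256 + altDigit d3.toNat * 16, out) := by
                                    simp [fixLoop, altDigit, ne_bs b3]
                                  rw [hst3]
                                  obtain ⟨h4, t4, hs4, hsc4⟩ := mySplit_cons_ex d3 r3 b3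
                                  rw [hsc4] at hs3
                                  injection hs3 with hh ht
                                  subst hh; subst ht
                                  cases r3 with
                                  | nil =>
                                      simp only [mySplit] at hs4
                                      injection hs4 with hh ht
                                      subst hh; subst ht
                                      simp [segOut]
                                  | cons d4 r4 =>
                                      simp only [List.length_cons] at hlen
                                      simp only [List.foldl_cons]
                                      by_cases b4 : d4 = '\\'
                                      · subst b4
                                        have hst4 : fixLoop (true, 4, altDigit d1.toNat * 4096 + altDigit d2.toNat * 256 + altDigit d3.toNat * 16, out) '\\'
                                            = (true, 0, altDigit d1.toNat * 4096 + altDigit d2.toNat * 256 + altDigit d3.toNat * 16, out) := by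
                                          simp [fixLoop]
                                        rw [hst4, (ih r4 (by omega)).2 _ out]
                                        simp only [mySplit] at hs4
                                        injection hs4 with hh ht
                                        subst hh; subst ht
                                        simp [segOut]
                                      · have hst4 : fixLoop (true, 4, altDigit d1.toNat * 4096 + altDigit d2.toNat * 256 + altDigit d3.toNat * 16, out) d4
                                            = (false, 4, altDigit d1.toNat * 4096 + altDigit d2.toNat * 256 + altDigit d3.toNat * 16 + altDigit d4.toNat,
                                               out ++ [Char.ofNat (altDigit d1.toNat * 4096 + altDigit d2.toNat * 256 + altDigit d3.toNat * 16 + altDigit d4.toNat)]) := by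
                                          simp [fixLoop, altDigit, ne_bs b4]
                                        rw [hst4, (ih r4 (by omega)).1 4 _ _]
                                        obtain ⟨h5, t5, hs5, hsc5⟩ := mySplit_cons_ex d4 r4 b4
                                        rw [hsc5] at hs4
                                        injection hs4 with hh ht
                                        subst hh; subst ht
                                        have hv : altVal [d1, d2, d3, d4]
                                            = altDigit d1.toNat * 4096 + altDigit d2.toNat * 256 + altDigit d3.toNat * 16 + altDigit d4.toNat := by
                                          simp [altVal]; ring
                                        simp [segOut, hs5, hv]


theorem splitOn_go_eq :
    ∀ (fuel : Nat) (l cur : List Char) (acc : List (List Char)), l.length < fuel →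
      PySem.Chars.splitOn.go ['\\'] fuel l cur acc
        = acc.reverse ++ (mySplit l).modifyHead (cur.reverse ++ ·) := by
  intro fuel
  induction fuel with
  | zero => intro l cur acc h; omega
  | succ n ih =>
      intro l cur acc h
      cases l with
      | nil => simp [PySem.Chars.splitOn.go, mySplit]
      | cons c rest =>
          rw [PySem.Chars.splitOn.go]
          simp only [List.length_cons] at h
          by_cases hc : c = '\\'
          · subst hc
            have hp : List.isPrefixOf ['\\'] ('\\' :: rest) = true := by simp [List.isPrefixOf]
            rw [if_pos hp]
            simp only [List.length_singleton, List.drop_succ_cons, List.drop_zero]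
            rw [ih rest [] _ (by omega)]
            simp only [mySplit, List.modifyHead]
            cases h : mySplit rest with
            | nil => exact absurd h (mySplit_ne_nil rest)
            | cons a t => simp
          · have hp : List.isPrefixOf ['\\'] (c :: rest) = false := by
              simp [List.isPrefixOf]; exact fun h => absurd h.symm hc
            rw [if_neg (by simp [hp])]
            rw [ih rest (c :: cur) acc (by omega)]
            simp only [mySplit, if_neg hc, List.reverse_cons]
            cases h : mySplit rest with
            | nil => exact absurd h (mySplit_ne_nil rest)
            | cons a t => simp [List.modifyHead]

theorem splitOn_eq_mySplit (l : List Char) :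
    PySem.Chars.splitOn l ['\\'] = mySplit l := by
  unfold PySem.Chars.splitOn
  rw [splitOn_go_eq (l.length + 1) l [] [] (by omega)]
  cases h : mySplit l with
  | nil => exact absurd h (mySplit_ne_nil l)
  | cons a t => simp


theorem join_nil_eq_flatten (ps : List (List Char)) : PySem.Chars.join [] ps = ps.flatten := by
  simp only [PySem.Chars.join, List.intercalate]
  induction ps with
  | nil => simp
  | cons a t ih =>
      cases t with
      | nil => simp
      | cons b u => simpa [List.intersperse] using ih

theorem altStep_flatten (ps : List (List Char)) (seg : List Char) :
    (altStep ps seg).flatten = ps.flatten ++ segOut seg := by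
  cases seg with
  | nil => simp [altStep, segOut]
  | cons c rest =>
      simp only [altStep, segOut]
      split <;> [skip; simp]
      split <;> simp

theorem foldl_altStep (segs : List (List Char)) :
    ∀ ps, (segs.foldl altStep ps).flatten = ps.flatten ++ (segs.map segOut).flatten := by
  induction segs with
  | nil => simp
  | cons s t ih =>
      intro ps
      simp only [List.foldl_cons, List.map_cons, List.flatten_cons, ih, altStep_flatten,
        List.append_assoc]

theorem alt_eq (input : String) :
    fix_bb_encoding_alt input
      = String.ofList ((mySplit input.toList).headD []
          ++ (((mySplit input.toList).tail).map segOut).flatten) := by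
  unfold fix_bb_encoding_alt
  simp only [splitOn_eq_mySplit]
  rw [join_nil_eq_flatten, foldl_altStep]
  cases h : mySplit input.toList with
  | nil => exact absurd h (mySplit_ne_nil _)
  | cons a t => simp

-- ===== VERDICT (by name: the statement is the Claim_ definition above) =====
theorem fix_bb_encoding_spec : Claim_equal_fix_bb_encoding := by
  intro input _ _
  unfold Spec_fix_bb_encoding
  rw [alt_eq input]
  have h := (machine_main input.toList.length input.toList le_rfl).1 0 0 []
  simp only [fix_bb_encoding, h, List.nil_append]
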